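-- pv_equiv track=rewrite | github.com/dantetemplar/competitive-programming | Codeforces - Codeforces Round 1047 (Div. 3)/F_Префиксная_максимальная_инвариантность.py | solve
-- ===== SOURCE A (Python) =====
-- def solve(n: int, A: list[int], B: list[int]) -> int:
--     S = 0
--     prefix_max_matrix = []
--
--     for l in range(n):
--         previous_max_value = 0
--         prefix_max_row = []
--         for i, v in enumerate(A):
--             if i < l:
--                 prefix_max_row.append((False, 0))
--                 continue
--
--             if previous_max_value >= v:
--                 prefix_max_row.append((True, previous_max_value))
--             else:
--                 prefix_max_row.append((False, v))
--                 previous_max_value = v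
--         prefix_max_matrix.append(prefix_max_row)
--
--     for l in range(n):
--         prefix_max_row = prefix_max_matrix[l]
--
--         for r in range(l + 1, n + 1):
--             S += f(A[l:r], B[l:r], prefix_max=prefix_max_row, l=l, r=r)
--
--     return S
--
-- def f(
--     A_sub: list[int] | tuple[int, ...],
--     B_sub: list[int] | tuple[int, ...],
--     prefix_max: list[tuple[bool, int]],
--     l: int,
--     r: int,
-- ) -> int:
--     s = 0
--
--     for b, (same_as_previous, prefix_max_value) in zip(B_sub, prefix_max[l : r + 1]):
--         if same_as_previous and b <= prefix_max_value:
--             s += 1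
--         elif not same_as_previous and b == prefix_max_value:
--             s += 1
--
--     return s
-- ===== SOURCE B (Python) =====
-- def solve(n: int, A: list[int], B: list[int]) -> int:
--     # Each position j with start l matches independently of the right end r,
--     # and is counted once for every r in (j, n]: weight n - j.
--     M = min(n, len(A), len(B))
--     S = 0
--     for l in range(M):
--         prev = 0
--         j = l
--         for v, b in zip(A[l:M], B[l:M]):
--             if prev >= v:
--                 if b <= prev:
--                     S += n - j
--             else:
--                 if b == v:
--                     S += n - j
--                 prev = v
--             j += 1
--     return S
-- ===== Notes on version B (the rewrite author's own statement) =====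
-- stated objective: faster
-- what changed: B drops the prefix-max matrix and the whole inner r-loop: a position j's match with a left end l is independent of the right end r, so B counts it once with weight n-j in a single O(n^2) double loop over (l, j).
import Mathlib
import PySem

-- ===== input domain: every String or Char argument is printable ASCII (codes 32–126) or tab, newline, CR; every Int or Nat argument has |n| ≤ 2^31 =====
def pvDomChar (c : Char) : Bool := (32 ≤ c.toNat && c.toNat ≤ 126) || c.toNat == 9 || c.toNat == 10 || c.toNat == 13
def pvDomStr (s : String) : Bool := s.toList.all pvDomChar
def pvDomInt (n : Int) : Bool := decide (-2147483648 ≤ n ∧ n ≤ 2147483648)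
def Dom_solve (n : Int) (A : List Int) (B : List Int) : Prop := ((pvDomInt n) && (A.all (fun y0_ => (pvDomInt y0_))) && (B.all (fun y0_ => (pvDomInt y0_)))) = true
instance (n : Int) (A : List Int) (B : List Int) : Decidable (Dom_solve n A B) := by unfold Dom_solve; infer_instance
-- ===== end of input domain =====

-- B replaces A's O(n^3) prefix-max-matrix + per-(l,r) rescan by a single O(n^2)
-- double loop: each position j's match is independent of r and is counted with weight n - j.


-- ===== PORT A =====
-- Python helper `f` (A_sub is unused by the Python body, kept for fidelity)
def pyF (_Asub : List Int) (Bsub : List Int) (prefix_max : List (Bool × Int)) (l r : Int) : Int :=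
  (Bsub.zip (PySem.List.slice prefix_max (some l) (some (r + 1)))).foldl
    (fun s p =>
      if p.2.1 && decide (p.1 ≤ p.2.2) then s + 1
      else if !p.2.1 && (p.1 == p.2.2) then s + 1
      else s) 0

-- the inner row-building loop of A's first pass (state: previous_max_value, prefix_max_row)
def solveRow (A : List Int) (l : Int) : List (Bool × Int) :=
  ((PySem.List.enumerate A).foldl
    (fun (st : Int × List (Bool × Int)) iv =>
      if iv.1 < l then (st.1, st.2 ++ [(false, 0)])
      else if st.1 ≥ iv.2 then (st.1, st.2 ++ [(true, st.1)])
      else (iv.2, st.2 ++ [(false, iv.2)]))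
    (0, [])).2

def solve (n : Int) (A : List Int) (B : List Int) : Int :=
  let matrix := (PySem.List.pyRange 0 n 1).foldl (fun acc l => acc ++ [solveRow A l]) []
  (PySem.List.pyRange 0 n 1).foldl
    (fun S l =>
      let row := PySem.List.pyGetD matrix l []   -- l is always in range; [] is the IndexError guard
      (PySem.List.pyRange (l + 1) (n + 1) 1).foldl
        (fun S r =>
          S + pyF (PySem.List.slice A (some l) (some r)) (PySem.List.slice B (some l) (some r)) row l r)
        S)
    0

-- ===== PORT B =====
def solve_alt (n : Int) (A : List Int) (B : List Int) : Int :=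
  let M := min n (min (A.length : Int) (B.length : Int))
  (PySem.List.pyRange 0 M 1).foldl
    (fun S l =>
      (((PySem.List.slice A (some l) (some M)).zip (PySem.List.slice B (some l) (some M))).foldl
        (fun (st : Int × Int × Int) vb =>
          if st.1 ≥ vb.1 then
            (st.1, st.2.1 + 1, if vb.2 ≤ st.1 then st.2.2 + (n - st.2.1) else st.2.2)
          else
            (vb.1, st.2.1 + 1, if vb.2 == vb.1 then st.2.2 + (n - st.2.1) else st.2.2))
        (0, l, S)).2.2)
    0

-- ===== PRECONDITION & SPEC =====
def Spec_solve (n : Int) (A : List Int) (B : List Int) (out : Int) : Prop := out = solve_alt n A B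
instance (n : Int) (A : List Int) (B : List Int) (out : Int) : Decidable (Spec_solve n A B out) := by unfold Spec_solve; infer_instance

-- ===== CLAIM (what is proved, stated in full; the proofs are below) =====
def Claim_equal_solve : Prop := ∀ (n : Int) (A : List Int) (B : List Int), Dom_solve n A B → Spec_solve n A B (solve n A B)

-- ===== LEMMAS AND PROOFS =====

-- predicate of Python `f` on one (b, (same_as_previous, prefix_max_value)) pair
def pA (q : Int × (Bool × Int)) : Bool :=
  (q.2.1 && decide (q.1 ≤ q.2.2)) || (!q.2.1 && (q.1 == q.2.2))

-- the tail of a prefix-max row, built from a running max `prev`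
def rowF : Int → List Int → List (Bool × Int)
  | _, [] => []
  | prev, v :: t => if prev ≥ v then (true, prev) :: rowF prev t else (false, v) :: rowF v t

-- final running max of that loop
def rowP : Int → List Int → Int
  | prev, [] => prev
  | prev, v :: t => if prev ≥ v then rowP prev t else rowP v t

-- weighted match count: element j of zs (j < K) contributes K - j if it matches
def G : List (Int × (Bool × Int)) → Nat → Int
  | _, 0 => 0
  | [], _ + 1 => 0
  | z :: t, K + 1 => (if pA z then (K + 1 : Int) else 0) + G t K

theorem G_nil (K : Nat) : G [] K = 0 := by cases K <;> rfl

theorem G_zero (zs : List (Int × (Bool × Int))) : G zs 0 = 0 := by cases zs <;> rfl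

theorem rowFold_low (l : Int) (xs : List Int) : ∀ (s prev : Int) (acc : List (Bool × Int)),
    s + xs.length ≤ l →
    ((PySem.List.enumerate xs s).foldl
      (fun (st : Int × List (Bool × Int)) iv =>
        if iv.1 < l then (st.1, st.2 ++ [(false, 0)])
        else if st.1 ≥ iv.2 then (st.1, st.2 ++ [(true, st.1)])
        else (iv.2, st.2 ++ [(false, iv.2)]))
      (prev, acc)) = (prev, acc ++ List.replicate xs.length (false, 0)) := by
  induction xs with
  | nil => intro s prev acc h; simp [PySem.List.enumerate_nil]
  | cons v t ih =>
    intro s prev acc h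
    simp only [List.length_cons, Nat.cast_add, Nat.cast_one] at h
    rw [PySem.List.enumerate_cons, List.foldl_cons]
    rw [if_pos (by omega : s < l)]
    rw [ih (s + 1) prev (acc ++ [(false, 0)]) (by push_cast; omega)]
    simp [List.replicate_succ, List.append_assoc]

theorem rowFold_high (l : Int) (xs : List Int) : ∀ (s prev : Int) (acc : List (Bool × Int)),
    l ≤ s →
    ((PySem.List.enumerate xs s).foldl
      (fun (st : Int × List (Bool × Int)) iv =>
        if iv.1 < l then (st.1, st.2 ++ [(false, 0)])
        else if st.1 ≥ iv.2 then (st.1, st.2 ++ [(true, st.1)])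
        else (iv.2, st.2 ++ [(false, iv.2)]))
      (prev, acc)) = (rowP prev xs, acc ++ rowF prev xs) := by
  induction xs with
  | nil => intro s prev acc h; simp [PySem.List.enumerate_nil, rowP, rowF]
  | cons v t ih =>
    intro s prev acc h
    rw [PySem.List.enumerate_cons, List.foldl_cons]
    rw [if_neg (by omega : ¬ s < l)]
    by_cases hp : prev ≥ v
    · rw [if_pos hp, ih (s + 1) prev (acc ++ [(true, prev)]) (by omega)]
      simp [rowP, rowF, hp, List.append_assoc]
    · rw [if_neg hp, ih (s + 1) v (acc ++ [(false, v)]) (by omega)]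
      simp [rowP, rowF, hp, List.append_assoc]

theorem solveRow_drop (A : List Int) (lN : Nat) :
    (solveRow A (lN : Int)).drop lN = rowF 0 (A.drop lN) := by
  unfold solveRow
  conv_lhs => rw [← List.take_append_drop lN A]
  rw [PySem.List.enumerate_append, List.foldl_append]
  rw [rowFold_low (lN : Int) (A.take lN) 0 0 [] (by simp [List.length_take]; try omega)]
  by_cases hl : lN ≤ A.length
  · rw [rowFold_high (lN : Int) (A.drop lN) _ 0 _ (by simp [List.length_take]; try omega)]
    have hrep : (List.replicate (A.take lN).length ((false : Bool), (0 : Int))).length = lN := by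
      simp [List.length_take]; omega
    have hdl := List.drop_left (l₁ := List.replicate (A.take lN).length ((false : Bool), (0 : Int)))
      (l₂ := rowF 0 (A.drop lN))
    rw [hrep] at hdl
    simpa using hdl
  · have hd : A.drop lN = [] := List.drop_eq_nil_of_le (by omega)
    rw [hd]
    simp [PySem.List.enumerate_nil, rowF, List.drop_eq_nil_of_le, List.length_take]
    try omega

theorem zip_take_right {α β : Type} (xs : List α) : ∀ (ys : List β) (m : Nat),
    xs.length ≤ m → xs.zip (ys.take m) = xs.zip ys := by
  induction xs with
  | nil => intro ys m h; simp
  | cons x xs ih =>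
    intro ys m h
    cases ys with
    | nil => simp
    | cons y ys =>
      cases m with
      | zero => simp at h
      | succ m' =>
        simp only [List.take_succ_cons, List.zip_cons_cons]
        rw [ih ys m' (by simpa using h)]

theorem G_succ (zs : List (Int × (Bool × Int))) : ∀ (K : Nat),
    G zs (K + 1) = G zs K + ((zs.take (K + 1)).countP pA : Int) := by
  induction zs with
  | nil => intro K; simp [G_nil]
  | cons z t ih =>
    intro K
    cases K with
    | zero => cases hz : pA z <;> simp [G, List.countP_cons, hz]
    | succ K' =>
      rw [show G (z :: t) (K' + 1 + 1) = (if pA z then (K' + 1 + 1 : Int) else 0) + G t (K' + 1) from rfl]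
      rw [show G (z :: t) (K' + 1) = (if pA z then (K' + 1 : Int) else 0) + G t K' from rfl]
      rw [ih K']
      cases hz : pA z <;>
        simp [List.take_succ_cons, List.countP_cons, hz] <;> push_cast <;> ring

theorem sum_take_eq_G (zs : List (Int × (Bool × Int))) (K : Nat) :
    ((List.range K).map (fun k => ((zs.take (k + 1)).countP pA : Int))).sum = G zs K := by
  induction K with
  | zero => cases zs <;> rfl
  | succ K ih =>
    rw [List.range_succ, List.map_append, List.sum_append, ih, G_succ]
    simp

theorem pyF_char (A B : List Int) (lN rN : Nat) :
    pyF (PySem.List.slice A (some (lN : Int)) (some (rN : Int)))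
        (PySem.List.slice B (some (lN : Int)) (some (rN : Int)))
        (solveRow A (lN : Int)) (lN : Int) (rN : Int)
      = ((((B.drop lN).zip (rowF 0 (A.drop lN))).take (rN - lN)).countP pA : Int) := by
  unfold pyF
  have hcast : ((rN : Int) + 1) = ((rN + 1 : Nat) : Int) := by push_cast; ring
  rw [hcast, PySem.List.slice_natCast, PySem.List.slice_natCast, solveRow_drop]
  set b := B.drop lN
  set t := rowF 0 (A.drop lN)
  have h1 : (b.take (rN - lN)).zip (t.take (rN + 1 - lN)) = (b.zip t).take (rN - lN) := by
    rw [zip_take_right (b.take (rN - lN)) t (rN + 1 - lN)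
          (by simp [List.length_take]; omega)]
    rw [← zip_take_right (b.take (rN - lN)) t (rN - lN) (by simp [List.length_take])]
    rw [List.zip_eq_zipWith, List.zip_eq_zipWith, List.take_zipWith]
  rw [h1]
  have h2 : (fun (s : Int) (p : Int × (Bool × Int)) =>
      if p.2.1 && decide (p.1 ≤ p.2.2) then s + 1
      else if !p.2.1 && (p.1 == p.2.2) then s + 1 else s)
      = (fun s p => if pA p then s + 1 else s) := by
    funext s p
    cases h : p.2.1 <;> simp [pA, h]
  rw [h2, PySem.List.foldl_if_add_one]
  simp

theorem bridge (n : Int) (a : List Int) : ∀ (b : List Int) (prev S j : Int) (K : Nat),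
    j = n - K →
    (((a.zip b).take K).foldl
      (fun (st : Int × Int × Int) vb =>
        if st.1 ≥ vb.1 then
          (st.1, st.2.1 + 1, if vb.2 ≤ st.1 then st.2.2 + (n - st.2.1) else st.2.2)
        else
          (vb.1, st.2.1 + 1, if vb.2 == vb.1 then st.2.2 + (n - st.2.1) else st.2.2))
      (prev, j, S)).2.2
    = S + G (b.zip (rowF prev a)) K := by
  induction a with
  | nil => intro b prev S j K hj; simp [rowF, G_nil]
  | cons v a' ih =>
    intro b prev S j K hj
    cases b with
    | nil => simp [G_nil]
    | cons w b' =>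
      cases K with
      | zero => simp [G_zero]
      | succ K' =>
        simp only [List.zip_cons_cons, List.take_succ_cons, List.foldl_cons]
        by_cases hp : prev ≥ v
        · rw [if_pos hp]
          rw [ih b' prev _ (j + 1) K' (by push_cast at hj ⊢; omega)]
          have hrow : rowF prev (v :: a') = (true, prev) :: rowF prev a' := by
            simp [rowF, hp]
          rw [hrow, List.zip_cons_cons]
          rw [show G ((w, (true, prev)) :: b'.zip (rowF prev a')) (K' + 1)
              = (if pA (w, (true, prev)) then (K' + 1 : Int) else 0)
                + G (b'.zip (rowF prev a')) K' from rfl]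
          by_cases hw : w ≤ prev <;>
            simp [pA, hw, hj] <;> push_cast <;> ring
        · rw [if_neg hp]
          rw [ih b' v _ (j + 1) K' (by push_cast at hj ⊢; omega)]
          have hrow : rowF prev (v :: a') = (false, v) :: rowF v a' := by
            simp [rowF, hp]
          rw [hrow, List.zip_cons_cons]
          rw [show G ((w, (false, v)) :: b'.zip (rowF v a')) (K' + 1)
              = (if pA (w, (false, v)) then (K' + 1 : Int) else 0)
                + G (b'.zip (rowF v a')) K' from rfl]
          by_cases hw : w = v <;>
            simp [pA, hw, hj] <;> push_cast <;> ring

theorem solveA_sum (n : Int) (A B : List Int) :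
    solve n A B
      = ((PySem.List.pyRange 0 n 1).map
          (fun l => G ((B.drop l.toNat).zip (rowF 0 (A.drop l.toNat))) ((n - l).toNat))).sum := by
  unfold solve
  rw [PySem.List.foldl_append_singleton_eq_map, List.nil_append]
  dsimp only
  refine Eq.trans (PySem.List.foldl_congr_mem _ _
    (fun S l => S + G ((B.drop l.toNat).zip (rowF 0 (A.drop l.toNat))) ((n - l).toNat)) 0 ?_)
    (by rw [PySem.List.foldl_add, zero_add])
  intro S l hl
  dsimp only
  obtain ⟨h0l, hln⟩ := (PySem.List.mem_pyRange_one).1 hl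
  rw [PySem.List.pyGetD_map_pyRange_of_nonneg (solveRow A) n l [] h0l hln]
  rw [PySem.List.foldl_add
    (g := fun r => pyF (PySem.List.slice A (some l) (some r)) (PySem.List.slice B (some l) (some r))
      (solveRow A l) l r)]
  congr 1
  rw [PySem.List.pyRange_one (l + 1) (n + 1)]
  rw [show n + 1 - (l + 1) = n - l from by ring]
  rw [List.map_map]
  rw [List.map_congr_left
    (f := (fun r => pyF (PySem.List.slice A (some l) (some r)) (PySem.List.slice B (some l) (some r))
      (solveRow A l) l r) ∘ (fun k : Nat => l + 1 + (k : Int)))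
    (g := fun k : Nat => (((((B.drop l.toNat).zip (rowF 0 (A.drop l.toNat))).take (k + 1)).countP pA : Int)))
    ?_]
  · exact sum_take_eq_G _ _
  · intro k _
    obtain ⟨lN, rfl⟩ : ∃ m : Nat, l = (m : Int) := ⟨l.toNat, by omega⟩
    simp only [Function.comp, Int.toNat_natCast]
    rw [show (lN : Int) + 1 + (k : Int) = ((lN + 1 + k : Nat) : Int) from by push_cast; ring]
    rw [pyF_char A B lN (lN + 1 + k)]
    rw [show lN + 1 + k - lN = k + 1 from by omega]

theorem solveB_sum (n : Int) (A B : List Int) :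
    solve_alt n A B
      = ((PySem.List.pyRange 0 (min n (min (A.length : Int) (B.length : Int))) 1).map
          (fun l => G ((B.drop l.toNat).zip (rowF 0 (A.drop l.toNat))) ((n - l).toNat))).sum := by
  unfold solve_alt
  dsimp only
  refine Eq.trans (PySem.List.foldl_congr_mem _ _
    (fun S l => S + G ((B.drop l.toNat).zip (rowF 0 (A.drop l.toNat))) ((n - l).toNat)) 0 ?_)
    (by rw [PySem.List.foldl_add, zero_add])
  intro S l hl
  dsimp only
  obtain ⟨h0l, hlM⟩ := (PySem.List.mem_pyRange_one).1 hl
  obtain ⟨lN, rfl⟩ : ∃ m : Nat, l = (m : Int) := ⟨l.toNat, by omega⟩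
  obtain ⟨Mn, hM⟩ : ∃ m : Nat, min n (min (A.length : Int) (B.length : Int)) = (m : Int) :=
    ⟨(min n (min (A.length : Int) (B.length : Int))).toNat, by omega⟩
  rw [hM] at hlM ⊢
  rw [PySem.List.slice_natCast, PySem.List.slice_natCast]
  rw [List.zip_eq_zipWith, ← List.take_zipWith, ← List.zip_eq_zipWith]
  have htake : ((A.drop lN).zip (B.drop lN)).take (Mn - lN)
      = ((A.drop lN).zip (B.drop lN)).take ((n - (lN : Int)).toNat) := by
    rw [List.take_eq_take_iff]
    simp only [List.length_zip, List.length_drop]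
    omega
  rw [htake]
  rw [bridge n (A.drop lN) (B.drop lN) 0 S (lN : Int) ((n - (lN : Int)).toNat) (by omega)]
  simp

theorem main_eq (n : Int) (A B : List Int) : solve n A B = solve_alt n A B := by
  rw [solveA_sum, solveB_sum]
  by_cases hn : n ≤ 0
  · rw [PySem.List.pyRange_one_eq_nil (by omega : n ≤ (0 : Int)),
        PySem.List.pyRange_one_eq_nil (by omega : min n (min (A.length : Int) (B.length : Int)) ≤ (0 : Int))]
  · rw [PySem.List.pyRange_one_append 0 (min n (min (A.length : Int) (B.length : Int))) n
      (by omega) (min_le_left _ _)]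
    rw [List.map_append, List.sum_append]
    have hz : ∀ x ∈ (PySem.List.pyRange (min n (min (A.length : Int) (B.length : Int))) n 1).map
        (fun l => G ((B.drop l.toNat).zip (rowF 0 (A.drop l.toNat))) ((n - l).toNat)), x = 0 := by
      intro x hx
      simp only [List.mem_map] at hx
      obtain ⟨l, hl, rfl⟩ := hx
      obtain ⟨hMl, hln⟩ := PySem.List.mem_pyRange_one.1 hl
      have hab : A.length ≤ l.toNat ∨ B.length ≤ l.toNat := by omega
      rcases hab with h | h
      · rw [List.drop_eq_nil_of_le h]
        simp [rowF, G_nil]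
      · rw [List.drop_eq_nil_of_le h]
        simp [G_nil]
    rw [List.sum_eq_zero hz, add_zero]

-- ===== VERDICT (by name: the statement is the Claim_ definition above) =====
theorem solve_spec : Claim_equal_solve := by
  intro n A B _
  unfold Spec_solve
  exact main_eq n A B
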